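-- pv_equiv track=rewrite | github.com/jbandu/airline-scheduling | backend/app/agents/schedule_validation/conflict_analyzer.py | _create_priority_matrix
-- ===== SOURCE A (Python) =====
-- from typing import List, Dict, Any
--
-- def _create_priority_matrix(
--     issues: List[Dict[str, Any]]
-- ) -> Dict[str, Any]:
--     """Create priority matrix for issue resolution"""
--     matrix = {
--         "high_impact_high_urgency": [],
--         "high_impact_low_urgency": [],
--         "low_impact_high_urgency": [],
--         "low_impact_low_urgency": []
--     }
--
--     for issue in issues:
--         severity = issue.get("severity", "medium")
--         category = issue.get("category", "")
--
--         # Determine urgency based on severity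
--         high_urgency = severity in ("critical", "high")
--
--         # Determine impact based on category and description
--         high_impact = (
--             category in ("slot_validation", "aircraft_validation", "regulatory_validation") or
--             "cannot operate" in issue.get("description", "").lower()
--         )
--
--         # Place in matrix
--         if high_impact and high_urgency:
--             matrix["high_impact_high_urgency"].append(issue)
--         elif high_impact and not high_urgency:
--             matrix["high_impact_low_urgency"].append(issue)
--         elif not high_impact and high_urgency:
--             matrix["low_impact_high_urgency"].append(issue)
--         else:
--             matrix["low_impact_low_urgency"].append(issue)
--
--     return matrix
-- ===== SOURCE B (Python) =====
-- from typing import List, Dict, Any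
--
-- def _create_priority_matrix(
--     issues: List[Dict[str, Any]]
-- ) -> Dict[str, Any]:
--     """Create priority matrix for issue resolution (key-driven dispatch + per-bucket filter)."""
--     def _quadrant(issue):
--         high_urgency = issue.get("severity", "medium") in ("critical", "high")
--         high_impact = (
--             issue.get("category", "") in ("slot_validation", "aircraft_validation", "regulatory_validation")
--             or "cannot operate" in issue.get("description", "").lower()
--         )
--         return f"{'high' if high_impact else 'low'}_impact_{'high' if high_urgency else 'low'}_urgency"
--
--     keys = ("high_impact_high_urgency", "high_impact_low_urgency",
--             "low_impact_high_urgency", "low_impact_low_urgency")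
--     return {k: [issue for issue in issues if _quadrant(issue) == k] for k in keys}
-- ===== Notes on version B (the rewrite author's own statement) =====
-- stated objective: simpler
-- what changed: Replaces the four-way if/elif/else cascade with a computed quadrant key and builds each of the four buckets by filtering the issue list per key (dict comprehension), instead of one loop that appends into a pre-seeded dict.
import Mathlib
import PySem

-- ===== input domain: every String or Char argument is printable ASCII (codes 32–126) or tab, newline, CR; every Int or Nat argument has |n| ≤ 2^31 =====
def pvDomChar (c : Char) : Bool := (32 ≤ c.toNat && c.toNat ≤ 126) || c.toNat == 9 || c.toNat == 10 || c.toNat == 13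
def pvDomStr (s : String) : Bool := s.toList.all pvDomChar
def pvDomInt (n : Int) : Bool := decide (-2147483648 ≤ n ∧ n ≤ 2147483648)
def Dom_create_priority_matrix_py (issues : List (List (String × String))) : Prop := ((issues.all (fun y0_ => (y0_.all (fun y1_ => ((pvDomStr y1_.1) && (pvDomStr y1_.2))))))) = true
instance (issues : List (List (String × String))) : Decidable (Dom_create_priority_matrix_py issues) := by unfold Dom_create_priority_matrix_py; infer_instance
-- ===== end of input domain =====

-- B replaces A's four-way if/elif/else cascade by a computed quadrant key with one filter per bucket (simpler decomposition).

-- ===== PORT A =====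
-- one iteration of A's loop body: classify `issue` and append it into the matching bucket of the dict
def pvStepA (m : PySem.Dict String (List (List (String × String)))) (issue : List (String × String)) : PySem.Dict String (List (List (String × String))) :=
  let severity := (issue.lookup "severity").getD "medium"
  let category := (issue.lookup "category").getD ""
  let high_urgency := severity == "critical" || severity == "high"
  let high_impact :=
    (category == "slot_validation" || category == "aircraft_validation" || category == "regulatory_validation")
    || PySem.Str.isIn "cannot operate" (PySem.Str.lower ((issue.lookup "description").getD ""))
  if high_impact && high_urgency then m.modify "high_impact_high_urgency" [] (fun l => l ++ [issue])
  else if high_impact && !high_urgency then m.modify "high_impact_low_urgency" [] (fun l => l ++ [issue])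
  else if !high_impact && high_urgency then m.modify "low_impact_high_urgency" [] (fun l => l ++ [issue])
  else m.modify "low_impact_low_urgency" [] (fun l => l ++ [issue])

def create_priority_matrix_py (issues : List (List (String × String))) : List (String × List (List (String × String))) :=
  let matrix : PySem.Dict String (List (List (String × String))) :=
    ((((PySem.Dict.empty).insert "high_impact_high_urgency" []).insert "high_impact_low_urgency" []).insert "low_impact_high_urgency" []).insert "low_impact_low_urgency" []
  (issues.foldl pvStepA matrix).items

-- ===== PORT B =====
def pvQuadrant (issue : List (String × String)) : String :=
  let high_urgency := ((issue.lookup "severity").getD "medium") == "critical" || ((issue.lookup "severity").getD "medium") == "high"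
  let high_impact :=
    (((issue.lookup "category").getD "") == "slot_validation" || ((issue.lookup "category").getD "") == "aircraft_validation" || ((issue.lookup "category").getD "") == "regulatory_validation")
    || PySem.Str.isIn "cannot operate" (PySem.Str.lower ((issue.lookup "description").getD ""))
  (if high_impact then "high" else "low") ++ "_impact_" ++ (if high_urgency then "high" else "low") ++ "_urgency"

def create_priority_matrix_py_alt (issues : List (List (String × String))) : List (String × List (List (String × String))) :=
  ["high_impact_high_urgency", "high_impact_low_urgency", "low_impact_high_urgency", "low_impact_low_urgency"].map
    (fun k => (k, issues.filter (fun issue => pvQuadrant issue == k)))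

-- ===== PRECONDITION & SPEC =====
def Spec_create_priority_matrix_py (issues : List (List (String × String))) (out : List (String × List (List (String × String)))) : Prop := out = create_priority_matrix_py_alt issues
instance (issues : List (List (String × String))) (out : List (String × List (List (String × String)))) : Decidable (Spec_create_priority_matrix_py issues out) := by unfold Spec_create_priority_matrix_py; infer_instance

-- ===== CLAIM (what is proved, stated in full; the proofs are below) =====
def Claim_equal_create_priority_matrix_py : Prop := ∀ (issues : List (List (String × String))), Dom_create_priority_matrix_py issues → Spec_create_priority_matrix_py issues (create_priority_matrix_py issues)

-- ===== LEMMAS AND PROOFS =====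

-- the dict A maintains, parametrised by its four bucket contents
def pvMkM (l1 l2 l3 l4 : List (List (String × String))) : PySem.Dict String (List (List (String × String))) :=
  ((((PySem.Dict.empty).insert "high_impact_high_urgency" l1).insert "high_impact_low_urgency" l2).insert "low_impact_high_urgency" l3).insert "low_impact_low_urgency" l4

theorem pvMkM_items (l1 l2 l3 l4 : List (List (String × String))) :
    (pvMkM l1 l2 l3 l4).items = [("high_impact_high_urgency", l1), ("high_impact_low_urgency", l2), ("low_impact_high_urgency", l3), ("low_impact_low_urgency", l4)] := by
  rfl

-- classification condition shorthands (proof-side only)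
def pvHI (i : List (String × String)) : Bool :=
  (((i.lookup "category").getD "") == "slot_validation" || ((i.lookup "category").getD "") == "aircraft_validation" || ((i.lookup "category").getD "") == "regulatory_validation")
  || PySem.Str.isIn "cannot operate" (PySem.Str.lower ((i.lookup "description").getD ""))
def pvHU (i : List (String × String)) : Bool :=
  ((i.lookup "severity").getD "medium") == "critical" || ((i.lookup "severity").getD "medium") == "high"

theorem pvQuadrant_eq (i : List (String × String)) :
    pvQuadrant i = (if pvHI i then "high" else "low") ++ "_impact_" ++ (if pvHU i then "high" else "low") ++ "_urgency" := rfl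

theorem pvStepA_eq (l1 l2 l3 l4 : List (List (String × String))) (i : List (String × String)) :
    pvStepA (pvMkM l1 l2 l3 l4) i =
      if pvHI i && pvHU i then pvMkM (l1 ++ [i]) l2 l3 l4
      else if pvHI i && !pvHU i then pvMkM l1 (l2 ++ [i]) l3 l4
      else if !pvHI i && pvHU i then pvMkM l1 l2 (l3 ++ [i]) l4
      else pvMkM l1 l2 l3 (l4 ++ [i]) := by
  cases hi : pvHI i <;> cases hu : pvHU i <;>
    simp only [pvHI, pvHU] at hi hu <;>
    simp only [pvStepA, hi, hu] <;> rfl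

theorem pv_fold_invariant (issues : List (List (String × String))) :
    ∀ l1 l2 l3 l4,
      (issues.foldl pvStepA (pvMkM l1 l2 l3 l4)).items =
        [("high_impact_high_urgency", l1 ++ issues.filter (fun i => pvQuadrant i == "high_impact_high_urgency")),
         ("high_impact_low_urgency", l2 ++ issues.filter (fun i => pvQuadrant i == "high_impact_low_urgency")),
         ("low_impact_high_urgency", l3 ++ issues.filter (fun i => pvQuadrant i == "low_impact_high_urgency")),
         ("low_impact_low_urgency", l4 ++ issues.filter (fun i => pvQuadrant i == "low_impact_low_urgency"))] := by
  induction issues with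
  | nil => intro l1 l2 l3 l4; simp [pvMkM_items]
  | cons i rest ih =>
    intro l1 l2 l3 l4
    rw [List.foldl_cons, pvStepA_eq]
    cases hi : pvHI i <;> cases hu : pvHU i <;>
      simp [hi, hu, ih, pvQuadrant_eq]

-- ===== VERDICT (by name: the statement is the Claim_ definition above) =====
theorem create_priority_matrix_py_spec : Claim_equal_create_priority_matrix_py := by
  intro issues _
  unfold Spec_create_priority_matrix_py create_priority_matrix_py create_priority_matrix_py_alt
  have h := pv_fold_invariant issues [] [] [] []
  simp only [pvMkM] at h
  simp [h]
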